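-- pv_equiv track=rewrite | github.com/Cornul11/Retaily | journal_parser/parser.py | parse_journal_data
-- ===== SOURCE A (Python) =====
-- from typing import Dict, Tuple, Optional
--
-- def parse_journal_data(string: str) -> Tuple[Optional[str], Optional[str], Optional[str], Optional[str]]:
--     journal_record_no = None
--     journal_record_date = None
--     journal_record_cashier = None
--     journal_record_type = None
--
--     for line in string.split('\n'):
--         if 'Journal Record' in line:
--             split_line = line.rsplit('/', 1)
--             journal_record_no = split_line[0].strip().replace('Journal Record: ', '')
--             journal_record_date = split_line[1].strip()
--         if 'Cashier' in line:
--             journal_record_cashier = line.split(':')[1].strip()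
--         if 'Record Type' in line:
--             journal_record_type = line.split(':')[1].strip()
--
--     return (
--         journal_record_no,
--         journal_record_date,
--         journal_record_cashier,
--         journal_record_type,
--     )
-- ===== SOURCE B (Python) =====
-- def parse_journal_data(string):
--     lines = string.split('\n')
--     journal_record_no = None
--     journal_record_date = None
--     journal_record_cashier = None
--     journal_record_type = None
--
--     jr = [l for l in lines if 'Journal Record' in l]
--     if jr:
--         left, right = jr[-1].rsplit('/', 1)
--         journal_record_no = left.strip().replace('Journal Record: ', '')
--         journal_record_date = right.strip()
--
--     ca = [l for l in lines if 'Cashier' in l]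
--     if ca:
--         journal_record_cashier = ca[-1].split(':')[1].strip()
--
--     rt = [l for l in lines if 'Record Type' in l]
--     if rt:
--         journal_record_type = rt[-1].split(':')[1].strip()
--
--     return (
--         journal_record_no,
--         journal_record_date,
--         journal_record_cashier,
--         journal_record_type,
--     )
-- ===== Notes on version B (the rewrite author's own statement) =====
-- stated objective: simpler
-- what changed: A's single fold that interleaves all four field updates per line is replaced by one split plus three independent per-field scans, each parsing only the last line matching its marker.
import Mathlib
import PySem

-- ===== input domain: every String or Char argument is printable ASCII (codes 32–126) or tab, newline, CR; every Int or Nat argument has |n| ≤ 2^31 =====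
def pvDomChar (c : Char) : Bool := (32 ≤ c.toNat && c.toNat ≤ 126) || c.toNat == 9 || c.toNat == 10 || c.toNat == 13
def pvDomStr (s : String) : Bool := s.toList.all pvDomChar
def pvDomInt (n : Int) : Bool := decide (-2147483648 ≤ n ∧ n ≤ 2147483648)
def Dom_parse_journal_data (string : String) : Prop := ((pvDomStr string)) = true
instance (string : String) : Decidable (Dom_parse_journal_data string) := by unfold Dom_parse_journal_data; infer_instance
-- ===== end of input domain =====

-- B replaces A's single interleaved fold over the lines by one split plus three independent
-- last-matching-line scans, one per field (objective: simpler per-field decomposition, same cost).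

-- ===== PORT A =====
-- shared output step: the final `return (…)` tuple, each field turned into an Option String
def pvOut (st : Option (List Char) × Option (List Char) × Option (List Char) × Option (List Char)) :
    Option String × Option String × Option String × Option String :=
  (st.1.map String.ofList, st.2.1.map String.ofList, st.2.2.1.map String.ofList, st.2.2.2.map String.ofList)

-- hand port of line.rsplit('/', 1): exact — Python splits at the HIGHEST '/' (PySem.Chars.rfind),
-- returning [line] when '/' is absent
def pvRsplit1 (cs : List Char) : List (List Char) :=
  if PySem.Chars.rfind cs ['/'] = -1 then [cs]
  else [cs.take (PySem.Chars.rfind cs ['/']).toNat, cs.drop ((PySem.Chars.rfind cs ['/']).toNat + 1)]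

-- the loop body of A; the `.getD _ []` defaults stand where Python raises IndexError (outside Pre_)
def pvStepA (st : Option (List Char) × Option (List Char) × Option (List Char) × Option (List Char))
    (line : List Char) :
    Option (List Char) × Option (List Char) × Option (List Char) × Option (List Char) :=
  let st :=
    if PySem.Chars.isIn "Journal Record".toList line then
      (some (PySem.Chars.replace (PySem.Chars.strip ((pvRsplit1 line).getD 0 [])) "Journal Record: ".toList []),
       some (PySem.Chars.strip ((pvRsplit1 line).getD 1 [])), st.2.2.1, st.2.2.2)
    else st
  let st :=
    if PySem.Chars.isIn "Cashier".toList line then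
      (st.1, st.2.1, some (PySem.Chars.strip ((PySem.Chars.splitOn line [':']).getD 1 [])), st.2.2.2)
    else st
  if PySem.Chars.isIn "Record Type".toList line then
    (st.1, st.2.1, st.2.2.1, some (PySem.Chars.strip ((PySem.Chars.splitOn line [':']).getD 1 [])))
  else st

def parse_journal_data (string : String) : Option String × Option String × Option String × Option String :=
  pvOut ((PySem.Chars.splitOn string.toList ['\n']).foldl pvStepA (none, none, none, none))

-- ===== PORT B =====
-- hand port of the unpacking `left, right = line.rsplit('/', 1)` (exact where it does not raise;
-- the default pair stands where Python raises ValueError, outside Pre_)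
def pvRsplitSlash (cs : List Char) : List Char × List Char :=
  if PySem.Chars.rfind cs ['/'] = -1 then (cs, [])
  else (cs.take (PySem.Chars.rfind cs ['/']).toNat, cs.drop ((PySem.Chars.rfind cs ['/']).toNat + 1))

-- `jr = [l for l in lines if 'Journal Record' in l]; if jr: … jr[-1].rsplit('/', 1) …`
def pvJRField (lines : List (List Char)) : Option (List Char) × Option (List Char) :=
  match (lines.filter (fun l => PySem.Chars.isIn "Journal Record".toList l)).getLast? with
  | none => (none, none)
  | some l =>
    (some (PySem.Chars.replace (PySem.Chars.strip (pvRsplitSlash l).1) "Journal Record: ".toList []),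
     some (PySem.Chars.strip (pvRsplitSlash l).2))

-- `[l for l in lines if pat in l]` and, if non-empty, `…[-1].split(':')[1].strip()`
def pvColonField (lines : List (List Char)) (pat : List Char) : Option (List Char) :=
  match (lines.filter (fun l => PySem.Chars.isIn pat l)).getLast? with
  | none => none
  | some l => some (PySem.Chars.strip ((PySem.Chars.splitOn l [':']).getD 1 []))

def pvAltCore (lines : List (List Char)) :
    Option (List Char) × Option (List Char) × Option (List Char) × Option (List Char) :=
  ((pvJRField lines).1, (pvJRField lines).2,
   pvColonField lines "Cashier".toList, pvColonField lines "Record Type".toList)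

def parse_journal_data_alt (string : String) :
    Option String × Option String × Option String × Option String :=
  pvOut (pvAltCore (PySem.Chars.splitOn string.toList ['\n']))

-- ===== PRECONDITION & SPEC =====
-- Pre_ excludes exactly the inputs on which the Python A raises IndexError: some line containing
-- 'Journal Record' without a '/', or containing 'Cashier' or 'Record Type' without a ':'.
def Pre_parse_journal_data (string : String) : Prop :=
  ∀ l ∈ PySem.Chars.splitOn string.toList ['\n'],
    (PySem.Chars.isIn "Journal Record".toList l = true → PySem.Chars.isIn ['/'] l = true) ∧
    (PySem.Chars.isIn "Cashier".toList l = true → PySem.Chars.isIn [':'] l = true) ∧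
    (PySem.Chars.isIn "Record Type".toList l = true → PySem.Chars.isIn [':'] l = true)
instance (string : String) : Decidable (Pre_parse_journal_data string) := by
  unfold Pre_parse_journal_data; infer_instance

def pvWitness_parse_journal_data : String :=
  "Journal Record: 5 / 2020\nCashier: Bob\nRecord Type: SALE"

def Spec_parse_journal_data (string : String) (out : Option String × Option String × Option String × Option String) : Prop := out = parse_journal_data_alt string
instance (string : String) (out : Option String × Option String × Option String × Option String) : Decidable (Spec_parse_journal_data string out) := by unfold Spec_parse_journal_data; infer_instance

-- ===== CLAIM (what is proved, stated in full; the proofs are below) =====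
def Claim_equal_parse_journal_data : Prop := ∀ (string : String), Dom_parse_journal_data string → Pre_parse_journal_data string → Spec_parse_journal_data string (parse_journal_data string)

-- ===== LEMMAS AND PROOFS =====

-- a fold that overwrites its state on every line satisfying p keeps the value of the LAST such line
theorem foldl_if_last {β : Type} (p : List Char → Bool) (f : List Char → β)
    (lines : List (List Char)) (init : β) :
    lines.foldl (fun st l => if p l then f l else st) init
      = ((lines.filter p).getLast?).elim init f := by
  induction lines generalizing init with
  | nil => simp
  | cons l ls ih =>
    by_cases h : p l
    · simp only [List.foldl_cons, List.filter_cons, h, if_pos]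
      rw [ih]
      cases hl : (ls.filter p).getLast? with
      | none => simp [List.getLast?_cons, hl]
      | some x => simp [List.getLast?_cons, hl]
    · simp only [List.foldl_cons, List.filter_cons, h, Bool.false_eq_true, ite_false]
      rw [ih]

-- the four components of pvStepA are updated independently
theorem pvStepA_eq (st : Option (List Char) × Option (List Char) × Option (List Char) × Option (List Char))
    (l : List Char) :
    pvStepA st l =
      ((if PySem.Chars.isIn "Journal Record".toList l then
          some (PySem.Chars.replace (PySem.Chars.strip ((pvRsplit1 l).getD 0 [])) "Journal Record: ".toList [])
        else st.1),
       (if PySem.Chars.isIn "Journal Record".toList l then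
          some (PySem.Chars.strip ((pvRsplit1 l).getD 1 []))
        else st.2.1),
       (if PySem.Chars.isIn "Cashier".toList l then
          some (PySem.Chars.strip ((PySem.Chars.splitOn l [':']).getD 1 []))
        else st.2.2.1),
       (if PySem.Chars.isIn "Record Type".toList l then
          some (PySem.Chars.strip ((PySem.Chars.splitOn l [':']).getD 1 []))
        else st.2.2.2)) := by
  obtain ⟨a, b, c, d⟩ := st
  simp only [pvStepA]
  split_ifs <;> rfl

theorem pvStepA_funext :
    pvStepA = fun st l =>
      ((if PySem.Chars.isIn "Journal Record".toList l then
          some (PySem.Chars.replace (PySem.Chars.strip ((pvRsplit1 l).getD 0 [])) "Journal Record: ".toList [])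
        else st.1),
       (if PySem.Chars.isIn "Journal Record".toList l then
          some (PySem.Chars.strip ((pvRsplit1 l).getD 1 []))
        else st.2.1),
       (if PySem.Chars.isIn "Cashier".toList l then
          some (PySem.Chars.strip ((PySem.Chars.splitOn l [':']).getD 1 []))
        else st.2.2.1),
       (if PySem.Chars.isIn "Record Type".toList l then
          some (PySem.Chars.strip ((PySem.Chars.splitOn l [':']).getD 1 []))
        else st.2.2.2)) :=
  funext fun st => funext fun l => pvStepA_eq st l

-- a componentwise fold over a 4-tuple is the 4-tuple of the component folds
theorem foldl_prod4 {α β γ δ ε : Type}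
    (f1 : α → ε → α) (f2 : β → ε → β) (f3 : γ → ε → γ) (f4 : δ → ε → δ)
    (xs : List ε) (a : α) (b : β) (c : γ) (d : δ) :
    xs.foldl (fun st x => (f1 st.1 x, f2 st.2.1 x, f3 st.2.2.1 x, f4 st.2.2.2 x)) (a, b, c, d)
      = (xs.foldl f1 a, xs.foldl f2 b, xs.foldl f3 c, xs.foldl f4 d) := by
  induction xs generalizing a b c d with
  | nil => rfl
  | cons x xs ih => simp only [List.foldl_cons]; exact ih _ _ _ _

-- the two hand ports of rsplit('/', 1) agree componentwise
theorem pvRsplit_eq (cs : List Char) :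
    (pvRsplit1 cs)[0]?.getD [] = (pvRsplitSlash cs).1 ∧
    (pvRsplit1 cs)[1]?.getD [] = (pvRsplitSlash cs).2 := by
  unfold pvRsplit1 pvRsplitSlash
  by_cases h : PySem.Chars.rfind cs ['/'] = -1 <;> simp [h]

-- A's fold computes exactly B's three per-field last-match results
theorem foldA_eq (lines : List (List Char)) :
    lines.foldl pvStepA (none, none, none, none) = pvAltCore lines := by
  rw [pvStepA_funext,
    foldl_prod4 (fun v l => if PySem.Chars.isIn "Journal Record".toList l then
        some (PySem.Chars.replace (PySem.Chars.strip ((pvRsplit1 l).getD 0 [])) "Journal Record: ".toList [])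
      else v)
      (fun v l => if PySem.Chars.isIn "Journal Record".toList l then
        some (PySem.Chars.strip ((pvRsplit1 l).getD 1 [])) else v)
      (fun v l => if PySem.Chars.isIn "Cashier".toList l then
        some (PySem.Chars.strip ((PySem.Chars.splitOn l [':']).getD 1 [])) else v)
      (fun v l => if PySem.Chars.isIn "Record Type".toList l then
        some (PySem.Chars.strip ((PySem.Chars.splitOn l [':']).getD 1 [])) else v),
    foldl_if_last, foldl_if_last, foldl_if_last, foldl_if_last]
  unfold pvAltCore pvJRField pvColonField
  cases hjr : (lines.filter (fun l => PySem.Chars.isIn "Journal Record".toList l)).getLast? <;>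
  cases hca : (lines.filter (fun l => PySem.Chars.isIn "Cashier".toList l)).getLast? <;>
  cases hrt : (lines.filter (fun l => PySem.Chars.isIn "Record Type".toList l)).getLast? <;>
  simp_all [(pvRsplit_eq _).1, (pvRsplit_eq _).2]

-- ===== VERDICT (by name: the statement is the Claim_ definition above) =====
theorem parse_journal_data_spec : Claim_equal_parse_journal_data := by
  intro s _ _
  unfold Spec_parse_journal_data parse_journal_data parse_journal_data_alt
  rw [foldA_eq]
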